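-- pv_equiv track=rewrite | github.com/charaybids/MITB-Assignments | Algo Design and Implementation/Assignment 3/Alt A3Q2.py | dynamic_palindrome_removal
-- ===== SOURCE A (Python) =====
-- def is_palindrome(lst):
--     return lst == lst[::-1]
--
-- def find_largest_palindrome(arr):
--     best_indices = (-1, -1)
--     for start in range(len(arr)):
--         for end in range(start + 2, len(arr) + 1):
--             subarray = arr[start:end]
--             if is_palindrome(subarray) and (end - start) > (best_indices[1] - best_indices[0]):
--                 best_indices = (start, end)
--     return best_indices
--
-- def find_best_element_to_remove(arr, memo):
--     min_steps = float('inf')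
--     best_index = -1
--
--     for i in range(len(arr)):
--         temp_arr = tuple(arr[:i] + arr[i+1:])
--         if temp_arr not in memo:
--             memo[temp_arr] = dynamic_palindrome_removal(list(temp_arr), memo)
--         steps = memo[temp_arr]
--         if steps < min_steps:
--             min_steps = steps
--             best_index = i
--
--     return best_index
--
-- def dynamic_palindrome_removal(arr, memo=None):
--     if memo is None:
--         memo = {}
--     steps = 0
--     while len(arr) > 0:
--         start, end = find_largest_palindrome(arr)
--         if start != -1:
--             arr = arr[:start] + arr[end:]
--             steps += 1
--         else:
--             best_index = find_best_element_to_remove(arr, memo)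
--             if best_index != -1:
--                 arr.pop(best_index)
--             else:
--                 arr.pop(0)
--             steps += 1
--     return steps
-- ===== SOURCE B (Python) =====
-- # B: different decomposition throughout — the largest-palindrome search becomes an O(n^2)
-- # interval DP producing the list of palindromic spans (winner read off with max, key=length),
-- # the stuck-state choice becomes a staged pass (collect candidate step counts, then argmin of
-- # the list), and the step counting is a tail recursion with an accumulator instead of A's
-- # while-loop with in-place pops.  Unlike A, B never mutates the caller's list; the return
-- # value is identical.
--
-- def _pal_spans(arr):
--     n = len(arr)
--     pal = set()
--     for length in range(2, n + 1):
--         for s in range(n - length + 1):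
--             if arr[s] == arr[s + length - 1] and (length <= 3 or (s + 1, s + length - 1) in pal):
--                 pal.add((s, s + length))
--     return [(s, e) for s in range(n) for e in range(s + 2, n + 1) if (s, e) in pal]
--
-- def dynamic_palindrome_removal(arr, memo=None):
--     if memo is None:
--         memo = {}
--
--     def count(arr, steps):
--         if not arr:
--             return steps
--         spans = _pal_spans(arr)
--         if spans:
--             s, e = max(spans, key=lambda p: p[1] - p[0])
--             return count(arr[:s] + arr[e:], steps + 1)
--         # stuck state: remove the element whose removal leads to the fewest memoized steps
--         cands = []
--         for i in range(len(arr)):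
--             key = tuple(arr[:i] + arr[i + 1:])
--             if key not in memo:
--                 memo[key] = dynamic_palindrome_removal(list(key), memo)
--             cands.append(memo[key])
--         i = cands.index(min(cands))
--         return count(arr[:i] + arr[i + 1:], steps + 1)
--
--     return count(arr, 0)
-- ===== Notes on version B (the rewrite author's own statement) =====
-- stated objective: alternative
-- what changed: B recomputes the largest palindrome via an O(n^2) interval DP that produces the list of palindromic spans and reads the winner off with max(key=length), replaces A's online min/argmin tracking in the stuck state by a staged pass (collect the memoized candidate step counts, then take the index of their minimum), and counts steps by a tail recursion with an accumulator instead of A's while loop with in-place pops (return value only is claimed; A mutates the caller's list, B does not); …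
import Mathlib
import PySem

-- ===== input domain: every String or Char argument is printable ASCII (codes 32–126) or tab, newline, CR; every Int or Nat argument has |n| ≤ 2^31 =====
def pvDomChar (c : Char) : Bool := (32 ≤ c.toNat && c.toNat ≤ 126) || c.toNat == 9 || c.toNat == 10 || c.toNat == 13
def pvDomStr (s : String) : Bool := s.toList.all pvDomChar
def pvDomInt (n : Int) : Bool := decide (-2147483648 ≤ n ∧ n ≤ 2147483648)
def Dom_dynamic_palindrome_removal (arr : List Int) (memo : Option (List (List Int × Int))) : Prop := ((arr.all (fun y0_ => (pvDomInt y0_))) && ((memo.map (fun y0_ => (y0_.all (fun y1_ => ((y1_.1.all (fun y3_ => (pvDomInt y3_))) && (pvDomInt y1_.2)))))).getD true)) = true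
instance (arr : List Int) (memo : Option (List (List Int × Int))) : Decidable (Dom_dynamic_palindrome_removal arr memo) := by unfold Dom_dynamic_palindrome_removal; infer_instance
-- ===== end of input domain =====

-- B restructures the whole computation: the largest palindrome comes from an interval-DP span
-- list read off with max(key=length), the stuck-state choice is a staged pass (collect the
-- candidate step counts, then take the index of their minimum), and the step count is a tail
-- recursion with an accumulator instead of A's while loop with in-place pops.
-- Equivalence is about the RETURN value (A pops from the caller's list on stuck inputs, B does not).



-- ===== PORT A =====
-- the memo dict: keys are the tuples tuple(arr[:i] + arr[i+1:]), values the cached step counts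
abbrev PalMemo := PySem.Dict (List Int) Int

-- is_palindrome(lst) = (lst == lst[::-1]); lst[::-1] is List.reverse
def pvIsPal (l : List Int) : Bool := l == l.reverse

-- find_largest_palindrome: double loop over (start, end), slice + palindrome test, keep if strictly longer
def pvFindLargestA (arr : List Int) : Int × Int :=
  (List.range arr.length).foldl (fun (best : Int × Int) (s : Nat) =>
    (List.range' (s + 2) (arr.length + 1 - (s + 2))).foldl (fun (best : Int × Int) (e : Nat) =>
      if pvIsPal (PySem.List.slice arr (some (s : Int)) (some (e : Int)))
          && decide (((e : Int) - (s : Int)) > best.2 - best.1)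
      then ((s : Int), (e : Int)) else best) best) (-1, -1)

-- find_best_element_to_remove; `go` is the recursive call to dynamic_palindrome_removal (fuel is
-- supplied by pvGoA); state ((min_steps, best_index), memo) — min_steps = none plays float('inf')
def pvFindBestA (go : List Int → PalMemo → Int × PalMemo) (arr : List Int) (memo : PalMemo) :
    (Option Int × Int) × PalMemo :=
  (List.range arr.length).foldl (fun (st : (Option Int × Int) × PalMemo) (i : Nat) =>
    let temp := PySem.List.slice arr none (some (i : Int)) ++
                PySem.List.slice arr (some ((i : Int) + 1)) none
    let memo1 := if (st.2.get? temp).isNone then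
        let r := go temp st.2
        r.2.insert temp r.1
      else st.2
    let steps := memo1.getD temp 0    -- memo[temp_arr]: the key is present here
    if (match st.1.1 with | none => true | some m => decide (steps < m))
    then ((some steps, (i : Int)), memo1)
    else ((st.1.1, st.1.2), memo1)) ((none, -1), memo)

-- the while loop of dynamic_palindrome_removal; each iteration and each recursive call shortens
-- arr, so fuel arr.length + 1 (supplied by the wrapper) makes the fuel-0 branch unreachable
def pvGoA : Nat → List Int → PalMemo → Int × PalMemo
  | 0, _, memo => (0, memo)
  | f + 1, arr, memo =>
    if arr.length = 0 then (0, memo) else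
    let se := pvFindLargestA arr
    if se.1 != -1 then
      let r := pvGoA f (PySem.List.slice arr none (some se.1) ++
                        PySem.List.slice arr (some se.2) none) memo
      (r.1 + 1, r.2)
    else
      let fb := pvFindBestA (pvGoA f) arr memo
      let arr' := if fb.1.2 != -1 then
          (match PySem.List.pop? arr fb.1.2 with | some p => p.2 | none => arr)  -- arr.pop(best_index), always in range
        else
          (match PySem.List.pop? arr 0 with | some p => p.2 | none => arr)       -- arr.pop(0)
      let r := pvGoA f arr' fb.2
      (r.1 + 1, r.2)

def dynamic_palindrome_removal (arr : List Int) (memo : Option (List (List Int × Int))) : Int :=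
  (pvGoA (arr.length + 1) arr
    (match memo with | none => PySem.Dict.empty | some l => PySem.Dict.ofList l)).1

-- ===== PORT B =====
-- _pal_spans: the pal set, filled length-ascending (all indexing is in range), …
def pvPalSet (arr : List Int) : PySem.Set (Nat × Nat) :=
  (List.range' 2 (arr.length - 1)).foldl (fun pal L =>
    (List.range (arr.length + 1 - L)).foldl (fun pal s =>
      if (arr.getD s 0 == arr.getD (s + L - 1) 0)
          && (decide (L ≤ 3) || PySem.Set.contains pal (s + 1, s + L - 1))
      then PySem.Set.add pal (s, s + L) else pal) pal) PySem.Set.empty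

-- … then the span-list comprehension [(s, e) for s in range(n) for e in range(s+2, n+1) if (s,e) in pal]
def pvSpans (arr : List Int) : List (Nat × Nat) :=
  (List.range arr.length).flatMap (fun s =>
    ((List.range' (s + 2) (arr.length + 1 - (s + 2))).filter
        (fun e => PySem.Set.contains (pvPalSet arr) (s, e))).map (fun e => (s, e)))

-- the candidate pass of the stuck state: thread the memo, collect memo[temp] for every i
def pvCandsB (go : List Int → PalMemo → Int × PalMemo) (arr : List Int) (memo : PalMemo) :
    PalMemo × List Int :=
  (List.range arr.length).foldl (fun (st : PalMemo × List Int) (i : Nat) =>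
    let temp := PySem.List.slice arr none (some (i : Int)) ++
                PySem.List.slice arr (some ((i : Int) + 1)) none
    let memo1 := if (st.1.get? temp).isNone then
        let r := go temp st.1
        r.2.insert temp r.1
      else st.1
    (memo1, st.2 ++ [memo1.getD temp 0])) (memo, [])

-- count(arr, steps): tail recursion with the steps accumulator; fuel as for pvGoA
def pvCountB : Nat → List Int → PalMemo → Int → Int × PalMemo
  | 0, _, memo, steps => (steps, memo)
  | f + 1, arr, memo, steps =>
    if arr.isEmpty then (steps, memo) else
    match PySem.List.max? (pvSpans arr) (fun p => p.2 - p.1) with   -- max(spans, key=len)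
    | some se =>
        pvCountB f (PySem.List.slice arr none (some (se.1 : Int)) ++
                    PySem.List.slice arr (some (se.2 : Int)) none) memo (steps + 1)
    | none =>
        let mc := pvCandsB (fun a m => pvCountB f a m 0) arr memo
        let m := (PySem.List.min? mc.2 (fun x => x)).getD 0          -- min(cands); cands ≠ [] since arr ≠ []
        let i := (PySem.List.index? mc.2 m).getD 0                   -- cands.index(min(cands)); the min is in cands
        pvCountB f (PySem.List.slice arr none (some (i : Int)) ++
                    PySem.List.slice arr (some ((i : Int) + 1)) none) mc.1 (steps + 1)

def dynamic_palindrome_removal_alt (arr : List Int) (memo : Option (List (List Int × Int))) : Int :=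
  (pvCountB (arr.length + 1) arr
    (match memo with | none => PySem.Dict.empty | some l => PySem.Dict.ofList l) 0).1

-- ===== PRECONDITION & SPEC =====
def Spec_dynamic_palindrome_removal (arr : List Int) (memo : Option (List (List Int × Int))) (out : Int) : Prop := out = dynamic_palindrome_removal_alt arr memo
instance (arr : List Int) (memo : Option (List (List Int × Int))) (out : Int) : Decidable (Spec_dynamic_palindrome_removal arr memo out) := by unfold Spec_dynamic_palindrome_removal; infer_instance

-- ===== CLAIM (what is proved, stated in full; the proofs are below) =====
def Claim_equal_dynamic_palindrome_removal : Prop := ∀ (arr : List Int) (memo : Option (List (List Int × Int))), Dom_dynamic_palindrome_removal arr memo → Spec_dynamic_palindrome_removal arr memo (dynamic_palindrome_removal arr memo)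

-- ===== LEMMAS AND PROOFS =====

-- arr[s:e] as a palindrome, on Nat indices
def pvSubPal (arr : List Int) (s e : Nat) : Bool := pvIsPal ((arr.drop s).take (e - s))

-- peeling one layer off a palindrome test
theorem pvIsPal_cons_concat (x z : Int) (ys : List Int) :
    pvIsPal (x :: (ys ++ [z])) = ((x == z) && pvIsPal ys) := by
  have h : (x :: (ys ++ [z]) = z :: (ys.reverse ++ [x])) ↔ (x = z ∧ ys = ys.reverse) := by
    constructor
    · rintro h
      obtain ⟨rfl, h2⟩ := List.cons.inj h
      exact ⟨rfl, List.append_cancel_right h2⟩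
    · rintro ⟨rfl, h⟩
      rw [← h]
  simp only [pvIsPal, List.reverse_cons, List.reverse_append, List.reverse_nil, List.nil_append,
    List.cons_append] at *
  rw [Bool.eq_iff_iff]
  simp only [beq_iff_eq, Bool.and_eq_true, beq_iff_eq]
  simpa using h

theorem pvIsPal_short (l : List Int) (h : l.length ≤ 1) : pvIsPal l = true := by
  match l, h with
  | [], _ => rfl
  | [x], _ => simp [pvIsPal]

-- the DP recurrence on slices
theorem pvSubPal_rec (arr : List Int) (m L : Nat) (h2 : 2 ≤ L) (hle : m + L ≤ arr.length) :
    pvSubPal arr m (m + L) =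
      ((arr.getD m 0 == arr.getD (m + L - 1) 0) &&
        (decide (L ≤ 3) || pvSubPal arr (m + 1) (m + L - 1))) := by
  obtain ⟨K, rfl⟩ : ∃ K, L = K + 2 := ⟨L - 2, by omega⟩
  have hm : m < arr.length := by omega
  have hK : m + 1 + K < arr.length := by omega
  have hdecomp : (arr.drop m).take (K + 2) =
      arr.getD m 0 :: ((arr.drop (m + 1)).take K ++ [arr.getD (m + (K + 2) - 1) 0]) := by
    rw [List.drop_eq_getElem_cons hm, List.take_succ_cons, List.take_add_one]
    have h1 : (arr.drop (m + 1))[K]? = some arr[m + 1 + K] := by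
      rw [List.getElem?_drop]
      exact List.getElem?_eq_getElem hK
    rw [h1]
    have hg2 : arr.getD m 0 = arr[m] := List.getD_eq_getElem arr 0 hm
    have hg3 : arr.getD (m + (K + 2) - 1) 0 = arr[m + 1 + K] := by
      have : m + (K + 2) - 1 = m + 1 + K := by omega
      rw [this]
      exact List.getD_eq_getElem arr 0 hK
    rw [hg2, hg3]
    rfl
  unfold pvSubPal
  rw [show m + (K + 2) - m = K + 2 from by omega,
      show m + (K + 2) - 1 - (m + 1) = K from by omega, hdecomp, pvIsPal_cons_concat]
  by_cases h3 : K + 2 ≤ 3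
  · have : pvIsPal ((arr.drop (m + 1)).take K) = true := by
      apply pvIsPal_short
      have := List.length_take_le K (arr.drop (m + 1))
      omega
    simp [this, h3]
  · simp [h3]

-- step of pvPalSet's inner fold at span length L
def pvPalStep (arr : List Int) (L : Nat) (pal : PySem.Set (Nat × Nat)) (s : Nat) : PySem.Set (Nat × Nat) :=
  if (arr.getD s 0 == arr.getD (s + L - 1) 0)
      && (decide (L ≤ 3) || PySem.Set.contains pal (s + 1, s + L - 1))
  then PySem.Set.add pal (s, s + L) else pal

theorem pvPalSet_inner (arr : List Int) (L : Nat) (h2 : 2 ≤ L) (hLn : L ≤ arr.length) :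
    ∀ (j : Nat), j ≤ arr.length + 1 - L → ∀ (pal : PySem.Set (Nat × Nat)),
    (∀ s e : Nat, ((s, e) ∈ pal ↔ s + 2 ≤ e ∧ e ≤ arr.length ∧ e - s < L ∧ pvSubPal arr s e = true)) →
    (∀ s e : Nat, ((s, e) ∈ (List.range j).foldl (pvPalStep arr L) pal ↔
      s + 2 ≤ e ∧ e ≤ arr.length ∧ (e - s < L ∨ (e - s = L ∧ s < j)) ∧ pvSubPal arr s e = true)) := by
  intro j
  induction j with
  | zero =>
    intro _ pal hInv s e
    simp only [List.range_zero, List.foldl_nil]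
    rw [hInv s e]
    constructor
    · rintro ⟨ha, hb, hc, hd⟩; exact ⟨ha, hb, by omega, hd⟩
    · rintro ⟨ha, hb, hc, hd⟩; exact ⟨ha, hb, by omega, hd⟩
  | succ j ih =>
    intro hj pal hInv s e
    have hjL : j + L ≤ arr.length := by omega
    rw [List.range_succ, List.foldl_append, List.foldl_cons, List.foldl_nil]
    have hIJ := ih (by omega) pal hInv
    have hcond : ((arr.getD j 0 == arr.getD (j + L - 1) 0)
        && (decide (L ≤ 3) || PySem.Set.contains ((List.range j).foldl (pvPalStep arr L) pal) (j + 1, j + L - 1)))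
        = pvSubPal arr j (j + L) := by
      rw [pvSubPal_rec arr j L h2 hjL]
      by_cases h3 : L ≤ 3
      · simp [h3]
      · have hc : PySem.Set.contains ((List.range j).foldl (pvPalStep arr L) pal) (j + 1, j + L - 1)
            = pvSubPal arr (j + 1) (j + L - 1) := by
          rw [Bool.eq_iff_iff, PySem.Set.contains_iff, hIJ (j + 1) (j + L - 1)]
          constructor
          · rintro ⟨-, -, -, h⟩; exact h
          · intro h; exact ⟨by omega, by omega, by omega, h⟩
        rw [hc]
    rw [show pvPalStep arr L ((List.range j).foldl (pvPalStep arr L) pal) j =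
        (if pvSubPal arr j (j + L) = true then
          PySem.Set.add ((List.range j).foldl (pvPalStep arr L) pal) (j, j + L)
        else (List.range j).foldl (pvPalStep arr L) pal) from by
      rw [pvPalStep, hcond]]
    by_cases hsp : pvSubPal arr j (j + L) = true
    · rw [if_pos hsp, PySem.Set.mem_add, hIJ s e]
      constructor
      · rintro (⟨ha, hb, hc, hd⟩ | heq)
        · exact ⟨ha, hb, by omega, hd⟩
        · obtain ⟨rfl, rfl⟩ : s = j ∧ e = j + L := by simpa [Prod.ext_iff] using heq
          exact ⟨by omega, hjL, by omega, hsp⟩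
      · rintro ⟨ha, hb, hc, hd⟩
        rcases hc with hc | ⟨hc, hc'⟩
        · exact Or.inl ⟨ha, hb, Or.inl hc, hd⟩
        · by_cases hs : s < j
          · exact Or.inl ⟨ha, hb, Or.inr ⟨hc, hs⟩, hd⟩
          · obtain rfl : s = j := by omega
            obtain rfl : e = s + L := by omega
            exact Or.inr rfl
    · rw [if_neg hsp, hIJ s e]
      constructor
      · rintro ⟨ha, hb, hc, hd⟩; exact ⟨ha, hb, by omega, hd⟩
      · rintro ⟨ha, hb, hc, hd⟩
        refine ⟨ha, hb, ?_, hd⟩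
        rcases hc with hc | ⟨hc, hc'⟩
        · exact Or.inl hc
        · by_cases hs : s < j
          · exact Or.inr ⟨hc, hs⟩
          · exfalso
            obtain rfl : s = j := by omega
            obtain rfl : e = s + L := by omega
            exact hsp hd

theorem pvPalSet_outer (arr : List Int) :
    ∀ (cnt st : Nat), 2 ≤ st → st + cnt ≤ arr.length + 1 →
    ∀ (pal : PySem.Set (Nat × Nat)),
    (∀ s e : Nat, ((s, e) ∈ pal ↔ s + 2 ≤ e ∧ e ≤ arr.length ∧ e - s < st ∧ pvSubPal arr s e = true)) →
    (∀ s e : Nat, ((s, e) ∈ (List.range' st cnt).foldl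
        (fun pal L => (List.range (arr.length + 1 - L)).foldl (pvPalStep arr L) pal) pal ↔
      s + 2 ≤ e ∧ e ≤ arr.length ∧ e - s < st + cnt ∧ pvSubPal arr s e = true)) := by
  intro cnt
  induction cnt with
  | zero =>
    intro st _ _ pal hInv s e
    simpa using hInv s e
  | succ cnt ih =>
    intro st hst hle pal hInv s e
    rw [List.range'_succ, List.foldl_cons]
    have hstep := pvPalSet_inner arr st hst (by omega) (arr.length + 1 - st) le_rfl pal hInv
    have hInv' : ∀ s e : Nat, ((s, e) ∈ (List.range (arr.length + 1 - st)).foldl (pvPalStep arr st) pal ↔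
        s + 2 ≤ e ∧ e ≤ arr.length ∧ e - s < st + 1 ∧ pvSubPal arr s e = true) := by
      intro s e
      rw [hstep s e]
      constructor
      · rintro ⟨ha, hb, hc, hd⟩; exact ⟨ha, hb, by omega, hd⟩
      · rintro ⟨ha, hb, hc, hd⟩; exact ⟨ha, hb, by omega, hd⟩
    have := ih (st + 1) (by omega) (by omega) _ hInv' s e
    rw [show st + 1 + cnt = st + (cnt + 1) from by omega] at this
    exact this

-- the pal set holds exactly the palindromic spans of length ≥ 2
theorem pvPalSet_mem (arr : List Int) (s e : Nat) :
    (s, e) ∈ pvPalSet arr ↔ s + 2 ≤ e ∧ e ≤ arr.length ∧ pvSubPal arr s e = true := by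
  by_cases hn : arr.length ≤ 1
  · have h0 : arr.length - 1 = 0 := by omega
    rw [pvPalSet, h0]
    simp only [List.range'_zero, List.foldl_nil, PySem.Set.empty]
    constructor
    · intro h; simp at h
    · rintro ⟨ha, hb, -⟩; omega
  · have hInv0 : ∀ s e : Nat, ((s, e) ∈ (PySem.Set.empty : PySem.Set (Nat × Nat)) ↔
        s + 2 ≤ e ∧ e ≤ arr.length ∧ e - s < 2 ∧ pvSubPal arr s e = true) := by
      intro s e
      simp only [PySem.Set.empty, List.not_mem_nil, false_iff]
      rintro ⟨ha, -, hc, -⟩; omega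
    have h := pvPalSet_outer arr (arr.length - 1) 2 le_rfl (by omega) PySem.Set.empty hInv0 s e
    rw [pvPalSet]
    rw [show (fun pal L => (List.range (arr.length + 1 - L)).foldl (pvPalStep arr L) pal) =
        (fun pal L => (List.range (arr.length + 1 - L)).foldl (fun pal s =>
          if (arr.getD s 0 == arr.getD (s + L - 1) 0)
              && (decide (L ≤ 3) || PySem.Set.contains pal (s + 1, s + L - 1))
          then PySem.Set.add pal (s, s + L) else pal) pal) from rfl] at h
    rw [h]
    constructor
    · rintro ⟨ha, hb, -, hd⟩; exact ⟨ha, hb, hd⟩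
    · rintro ⟨ha, hb, hd⟩; exact ⟨ha, hb, by omega, hd⟩

-- spans have s + 2 ≤ e
theorem pvSpans_bound (arr : List Int) : ∀ p ∈ pvSpans arr, p.1 + 2 ≤ p.2 := by
  intro p hp
  simp only [pvSpans, List.mem_flatMap, List.mem_map, List.mem_filter, List.mem_range'_1] at hp
  obtain ⟨s, -, e, ⟨⟨he, -⟩, -⟩, rfl⟩ := hp
  exact he

-- a guarded fold is a fold over the filtered list (the guard may not look at the accumulator)
theorem pvFoldl_guard {α β : Type} (p : β → Bool) (q : α → β → Bool) (f : β → α)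
    (l : List β) : ∀ (init : α),
    l.foldl (fun b x => if p x && q b x then f x else b) init
      = (l.filter p).foldl (fun b x => if q b x then f x else b) init := by
  induction l with
  | nil => intro init; rfl
  | cons x t ih =>
    intro init
    cases hp : p x with
    | true =>
      rw [List.foldl_cons, List.filter_cons, hp, if_pos rfl, List.foldl_cons, Bool.true_and]
      exact ih _
    | false =>
      rw [List.foldl_cons, List.filter_cons, hp, Bool.false_and]
      simp only [Bool.false_eq_true, if_false]
      exact ih init

-- the loop bodies of min?/max? (named so the stuck scrutinee can be reasoned about)
def pvMaxStep (acc : Option (Nat × Nat)) (p : Nat × Nat) : Option (Nat × Nat) :=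
  match acc with
  | none => some p
  | some m => if m.2 - m.1 < p.2 - p.1 then some p else some m

def pvMinStep (acc : Option Int) (c : Int) : Option Int :=
  match acc with
  | none => some c
  | some m => if c < m then some c else some m

theorem pvMax?_eq_foldl (l : List (Nat × Nat)) :
    PySem.List.max? l (fun p => p.2 - p.1) = l.foldl pvMaxStep none := by
  unfold PySem.List.max?
  apply PySem.List.foldl_congr_mem
  intro acc x _
  cases acc <;> rfl

theorem pvMin?_eq_foldl (l : List Int) :
    PySem.List.min? l (fun x => x) = l.foldl pvMinStep none := by
  unfold PySem.List.min?
  apply PySem.List.foldl_congr_mem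
  intro acc x _
  cases acc <;> rfl

-- strict-improvement fold over spans = Python max(spans, key=len) (first maximum)
theorem pvBestFold_aux (l : List (Nat × Nat)) (hl : ∀ p ∈ l, p.1 + 2 ≤ p.2) :
    ∀ (acc : Option (Nat × Nat)) (b : Int × Int),
    (acc = none → b = (-1, -1)) →
    (∀ m, acc = some m → b = ((m.1 : Int), (m.2 : Int)) ∧ m.1 + 2 ≤ m.2) →
    l.foldl (fun (b : Int × Int) (p : Nat × Nat) =>
        if decide (((p.2 : Int) - (p.1 : Int)) > b.2 - b.1) then ((p.1 : Int), (p.2 : Int)) else b) b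
      = (match l.foldl pvMaxStep acc with
         | none => (-1, -1)
         | some m => ((m.1 : Int), (m.2 : Int))) := by
  induction l with
  | nil =>
    intro acc b h0 h1
    cases acc with
    | none => simpa using h0 rfl
    | some m => simpa using (h1 m rfl).1
  | cons p t ih =>
    intro acc b h0 h1
    have hp : p.1 + 2 ≤ p.2 := hl p (List.mem_cons_self)
    have ht : ∀ q ∈ t, q.1 + 2 ≤ q.2 := fun q hq => hl q (List.mem_cons_of_mem _ hq)
    simp only [List.foldl_cons]
    cases acc with
    | none =>
      rw [h0 rfl]
      have hc : decide (((p.2 : Int) - (p.1 : Int)) > (-1 : Int) - (-1)) = true := by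
        rw [decide_eq_true_iff]; omega
      rw [hc]
      simp only [if_true]
      exact ih ht (some p) _ (by intro h; cases h) (by rintro m hm; cases hm; exact ⟨rfl, hp⟩)
    | some m =>
      obtain ⟨rfl, hm⟩ := h1 m rfl
      have hcond : decide (((p.2 : Int) - (p.1 : Int)) > (m.2 : Int) - (m.1 : Int))
          = decide (m.2 - m.1 < p.2 - p.1) := by
        rw [decide_eq_decide]
        omega
      rw [hcond]
      by_cases hlt : m.2 - m.1 < p.2 - p.1
      · simp only [pvMaxStep, hlt, decide_true, if_true]
        exact ih ht (some p) _ (by intro h; cases h) (by rintro q hq; cases hq; exact ⟨rfl, hp⟩)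
      · simp only [pvMaxStep, hlt, decide_false, Bool.false_eq_true, if_false]
        exact ih ht (some m) _ (by intro h; cases h) (by rintro q hq; cases hq; exact ⟨rfl, hm⟩)

-- fold over a flatMap is the nested fold
theorem pvFoldl_flatMap {α β γ : Type} (g : β → List γ) (f : α → γ → α) (l : List β) :
    ∀ (init : α), (l.flatMap g).foldl f init = l.foldl (fun acc x => (g x).foldl f acc) init := by
  induction l with
  | nil => intro init; rfl
  | cons x t ih => intro init; simp [List.flatMap_cons, List.foldl_append, ih]

-- A's find_largest_palindrome = max over B's span list (key = length, first maximum)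
theorem pvFindLargestA_eq (arr : List Int) :
    pvFindLargestA arr
      = (match PySem.List.max? (pvSpans arr) (fun p => p.2 - p.1) with
         | none => ((-1 : Int), (-1 : Int))
         | some se => ((se.1 : Int), (se.2 : Int))) := by
  have h1 : pvFindLargestA arr
      = (pvSpans arr).foldl (fun (b : Int × Int) (p : Nat × Nat) =>
          if decide (((p.2 : Int) - (p.1 : Int)) > b.2 - b.1) then ((p.1 : Int), (p.2 : Int)) else b)
        (-1, -1) := by
    rw [pvFindLargestA, pvSpans, pvFoldl_flatMap]
    apply PySem.List.foldl_congr_mem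
    intro best s hs
    have hs' : s < arr.length := List.mem_range.mp hs
    have hcong : (List.range' (s + 2) (arr.length + 1 - (s + 2))).foldl
        (fun (best : Int × Int) (e : Nat) =>
          if pvIsPal (PySem.List.slice arr (some (s : Int)) (some (e : Int)))
              && decide (((e : Int) - (s : Int)) > best.2 - best.1)
          then ((s : Int), (e : Int)) else best) best
        = (List.range' (s + 2) (arr.length + 1 - (s + 2))).foldl
        (fun (best : Int × Int) (e : Nat) =>
          if PySem.Set.contains (pvPalSet arr) (s, e)
              && decide (((e : Int) - (s : Int)) > best.2 - best.1)
          then ((s : Int), (e : Int)) else best) best := by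
      apply PySem.List.foldl_congr_mem
      intro b e he
      have he' : s + 2 ≤ e ∧ e < s + 2 + (arr.length + 1 - (s + 2)) := List.mem_range'_1.mp he
      have hc : pvIsPal (PySem.List.slice arr (some (s : Int)) (some (e : Int)))
          = PySem.Set.contains (pvPalSet arr) (s, e) := by
        rw [PySem.List.slice_natCast]
        rw [Bool.eq_iff_iff, PySem.Set.contains_iff, pvPalSet_mem]
        unfold pvSubPal
        constructor
        · intro h; exact ⟨by omega, by omega, h⟩
        · rintro ⟨-, -, h⟩; exact h
      rw [hc]
    rw [hcong, pvFoldl_guard (p := fun e => PySem.Set.contains (pvPalSet arr) (s, e))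
        (q := fun (b : Int × Int) (e : Nat) => decide (((e : Int) - (s : Int)) > b.2 - b.1))
        (f := fun e => ((s : Int), (e : Int)))]
    rw [List.foldl_map]
  rw [h1, pvBestFold_aux (pvSpans arr) (pvSpans_bound arr) none (-1, -1)
    (fun _ => rfl) (by rintro m ⟨⟩), pvMax?_eq_foldl]

-- min? over an appended element
theorem pvMin?_append (cs : List Int) (c : Int) :
    PySem.List.min? (cs ++ [c]) (fun x => x)
      = pvMinStep (PySem.List.min? cs (fun x => x)) c := by
  rw [pvMin?_eq_foldl, pvMin?_eq_foldl, List.foldl_append]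
  rfl

-- idxOf? of a fresh element appended at the end
theorem pvIdxOf?_append_self (v : Int) (l : List Int) (h : v ∉ l) :
    List.idxOf? v (l ++ [v]) = some l.length := by
  rw [List.idxOf?_eq_some_iff]
  refine ⟨by simp, by simp, ?_⟩
  intro j hj
  rw [List.getElem_append_left (by omega)]
  intro hcontra
  exact h (hcontra ▸ List.getElem_mem _)

-- idxOf? is unchanged by appending when the element already occurs
theorem pvIdxOf?_append_left (v : Int) (l l2 : List Int) (h : v ∈ l) :
    List.idxOf? v (l ++ l2) = List.idxOf? v l := by
  cases hk : List.idxOf? v l with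
  | none => exact absurd (List.idxOf?_eq_none_iff.mp hk) (by simpa using h)
  | some k =>
    obtain ⟨hk1, hk2, hk3⟩ := List.idxOf?_eq_some_iff.mp hk
    rw [List.idxOf?_eq_some_iff]
    refine ⟨by simp only [List.length_append]; omega,
      by rw [List.getElem_append_left hk1]; exact hk2, ?_⟩
    intro j hj
    rw [List.getElem_append_left (by omega)]
    exact hk3 j hj

-- the loop bodies of A's find_best fold and B's candidate fold, named for the invariant proof
def pvBestStepA (go : List Int → PalMemo → Int × PalMemo) (arr : List Int)
    (st : (Option Int × Int) × PalMemo) (i : Nat) : (Option Int × Int) × PalMemo :=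
  let temp := PySem.List.slice arr none (some (i : Int)) ++
              PySem.List.slice arr (some ((i : Int) + 1)) none
  let memo1 := if (st.2.get? temp).isNone then
      let r := go temp st.2
      r.2.insert temp r.1
    else st.2
  let steps := memo1.getD temp 0
  if (match st.1.1 with | none => true | some m => decide (steps < m))
  then ((some steps, (i : Int)), memo1)
  else ((st.1.1, st.1.2), memo1)

def pvCandsStepB (go : List Int → PalMemo → Int × PalMemo) (arr : List Int)
    (st : PalMemo × List Int) (i : Nat) : PalMemo × List Int :=
  let temp := PySem.List.slice arr none (some (i : Int)) ++
              PySem.List.slice arr (some ((i : Int) + 1)) none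
  let memo1 := if (st.1.get? temp).isNone then
      let r := go temp st.1
      r.2.insert temp r.1
    else st.1
  (memo1, st.2 ++ [memo1.getD temp 0])

theorem pvFindBestA_def (go : List Int → PalMemo → Int × PalMemo) (arr : List Int) (memo : PalMemo) :
    pvFindBestA go arr memo = (List.range arr.length).foldl (pvBestStepA go arr) ((none, -1), memo) := rfl

theorem pvCandsB_def (go : List Int → PalMemo → Int × PalMemo) (arr : List Int) (memo : PalMemo) :
    pvCandsB go arr memo = (List.range arr.length).foldl (pvCandsStepB go arr) (memo, []) := rfl

-- A's argmin value as read off B's candidate list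
def pvArgmin (cs : List Int) : Int :=
  match PySem.List.min? cs (fun x => x) with
  | none => (-1 : Int)
  | some m => (((PySem.List.index? cs m).getD 0 : Nat) : Int)

-- the invariant tying A's online (min, argmin, memo) fold to B's staged (memo, cands) fold
theorem pvFindBest_inv (go : List Int → PalMemo → Int × PalMemo) (arr : List Int) (memo : PalMemo) :
    ∀ (j : Nat),
    (List.range j).foldl (pvBestStepA go arr) ((none, -1), memo)
      = ((PySem.List.min? ((List.range j).foldl (pvCandsStepB go arr) (memo, [])).2 (fun x => x),
          pvArgmin ((List.range j).foldl (pvCandsStepB go arr) (memo, [])).2),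
         ((List.range j).foldl (pvCandsStepB go arr) (memo, [])).1)
    ∧ ((List.range j).foldl (pvCandsStepB go arr) (memo, [])).2.length = j := by
  intro j
  induction j with
  | zero => exact ⟨rfl, rfl⟩
  | succ j ih =>
    obtain ⟨ihEq, ihLen⟩ := ih
    rw [List.range_succ, List.foldl_append, List.foldl_append, List.foldl_cons, List.foldl_cons,
      List.foldl_nil, List.foldl_nil, ihEq]
    set bst := (List.range j).foldl (pvCandsStepB go arr) (memo, []) with hbst
    set temp := PySem.List.slice arr none (some (j : Int)) ++
                PySem.List.slice arr (some ((j : Int) + 1)) none with htemp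
    set memo1 := (if (bst.1.get? temp).isNone then
        let r := go temp bst.1
        r.2.insert temp r.1
      else bst.1) with hmemo1
    set c := memo1.getD temp 0 with hc
    have hB : pvCandsStepB go arr bst j = (memo1, bst.2 ++ [c]) := rfl
    rw [hB]
    cases hmin : PySem.List.min? bst.2 (fun x => x) with
    | none =>
      have hnil : bst.2 = [] := (PySem.List.min?_eq_none_iff _ _).mp hmin
      have hj0 : j = 0 := by rw [← ihLen, hnil]; rfl
      have hA : pvBestStepA go arr ((none, pvArgmin bst.2), bst.1) j
          = ((some c, (j : Int)), memo1) := by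
        simp only [pvBestStepA, ← htemp, ← hmemo1, ← hc]
        simp
      rw [hA]
      refine ⟨?_, by simp [hnil, hj0]⟩
      rw [hnil, List.nil_append]
      have hm1 : PySem.List.min? [c] (fun x => x) = some c := rfl
      simp only [hm1, pvArgmin]
      have hidx : PySem.List.index? [c] c = some 0 := by
        exact pvIdxOf?_append_self c [] (by simp)
      rw [hidx, hj0]
      rfl
    | some m =>
      have hmem : m ∈ bst.2 := PySem.List.min?_mem hmin
      have hisMin : ∀ y ∈ bst.2, m ≤ y := by
        intro y hy
        exact PySem.List.min?_isMin hmin y hy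
      have hA : pvBestStepA go arr ((some m, pvArgmin bst.2), bst.1) j
          = (if decide (c < m) then ((some c, (j : Int)), memo1)
             else ((some m, pvArgmin bst.2), memo1)) := by
        simp only [pvBestStepA, ← htemp, ← hmemo1, ← hc]
      rw [hA]
      by_cases hlt : c < m
      · rw [if_pos (decide_eq_true hlt)]
        have hmin' : PySem.List.min? (bst.2 ++ [c]) (fun x => x) = some c := by
          rw [pvMin?_append, hmin]
          show (if c < m then some c else some m) = _
          rw [if_pos hlt]
        refine ⟨?_, by simp [ihLen]⟩
        have hnotmem : c ∉ bst.2 := fun hcm => absurd (hisMin c hcm) (by omega)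
        simp only [hmin', pvArgmin]
        rw [show PySem.List.index? (bst.2 ++ [c]) c = some bst.2.length from
          pvIdxOf?_append_self c bst.2 hnotmem, ihLen]
        rfl
      · rw [if_neg (by simpa using hlt)]
        have hmin' : PySem.List.min? (bst.2 ++ [c]) (fun x => x) = some m := by
          rw [pvMin?_append, hmin]
          show (if c < m then some c else some m) = _
          rw [if_neg hlt]
        refine ⟨?_, by simp [ihLen]⟩
        simp only [hmin', pvArgmin, hmin]
        rw [show PySem.List.index? (bst.2 ++ [c]) m = PySem.List.index? bst.2 m from
          pvIdxOf?_append_left m bst.2 [c] hmem]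

-- A's find_best = (min, argmin, memo) of B's staged candidate pass
theorem pvFindBestA_eq (go : List Int → PalMemo → Int × PalMemo) (arr : List Int) (memo : PalMemo) :
    pvFindBestA go arr memo
      = ((PySem.List.min? (pvCandsB go arr memo).2 (fun x => x),
          pvArgmin (pvCandsB go arr memo).2),
         (pvCandsB go arr memo).1)
    ∧ (pvCandsB go arr memo).2.length = arr.length := by
  rw [pvFindBestA_def, pvCandsB_def]
  exact pvFindBest_inv go arr memo arr.length

-- the two loops return the same (count, memo); B carries the steps accumulator
theorem pvCount_eq (f : Nat) : ∀ (arr : List Int) (memo : PalMemo) (steps : Int),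
    pvCountB f arr memo steps = ((pvGoA f arr memo).1 + steps, (pvGoA f arr memo).2) := by
  induction f with
  | zero =>
    intro arr memo steps
    simp [pvCountB, pvGoA]
  | succ f ih =>
    intro arr memo steps
    by_cases h0 : arr.length = 0
    · have he : arr.isEmpty = true := by
        cases arr with
        | nil => rfl
        | cons x t => simp at h0
      simp [pvCountB, pvGoA, h0, he]
    · have he : arr.isEmpty = false := by
        cases arr with
        | nil => simp at h0
        | cons x t => rfl
      have hgo : (fun a m => pvCountB f a m 0) = pvGoA f := by
        funext a m
        rw [ih a m 0]
        simp
      rw [pvCountB, pvGoA]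
      simp only [he, Bool.false_eq_true, if_false, if_neg h0]
      rw [pvFindLargestA_eq arr]
      cases hmax : PySem.List.max? (pvSpans arr) (fun p => p.2 - p.1) with
      | some se =>
        have hs2 : se.1 + 2 ≤ se.2 := pvSpans_bound arr se (PySem.List.max?_mem hmax)
        have hne : (((se.1 : Int), (se.2 : Int)).1 != -1) = true := by
          simp only [bne_iff_ne, ne_eq]
          omega
        simp only [hne, if_true, ih]
        simp only [Prod.mk.injEq]
        exact ⟨by ring, trivial⟩
      | none =>
        have hne : (((-1 : Int), (-1 : Int)).1 != -1) = false := by decide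
        simp only [hne, Bool.false_eq_true, if_false]
        rw [hgo]
        obtain ⟨hfb, hlen⟩ := pvFindBestA_eq (pvGoA f) arr memo
        rw [hfb]
        set cs := (pvCandsB (pvGoA f) arr memo).2 with hcs
        have hcsne : cs ≠ [] := by
          intro hnil
          rw [hnil] at hlen
          exact h0 hlen.symm
        cases hminc : PySem.List.min? cs (fun x => x) with
        | none => exact absurd ((PySem.List.min?_eq_none_iff _ _).mp hminc) hcsne
        | some m =>
          have hmem : m ∈ cs := PySem.List.min?_mem hminc
          obtain ⟨k, hk⟩ : ∃ k, PySem.List.index? cs m = some k := by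
            cases hidx : PySem.List.index? cs m with
            | none => exact absurd (List.idxOf?_eq_none_iff.mp hidx) (by simpa using hmem)
            | some k => exact ⟨k, rfl⟩
          have hklt : k < arr.length := by
            have := (List.idxOf?_eq_some_iff.mp hk).1
            omega
          simp only [hminc, pvArgmin, hk, Option.getD_some]
          have hne2 : (((k : Nat) : Int) != -1) = true := by
            simp only [bne_iff_ne, ne_eq]
            omega
          simp only [hne2, if_true]
          have hpop : (match PySem.List.pop? arr ((k : Nat) : Int) with
              | some p => p.2 | none => arr)
              = PySem.List.slice arr none (some ((k : Nat) : Int)) ++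
                PySem.List.slice arr (some (((k : Nat) : Int) + 1)) none := by
            rw [PySem.List.pop?_natCast arr k hklt, PySem.List.slice_to_natCast,
              show (((k : Nat) : Int) + 1) = (((k + 1 : Nat)) : Int) from by push_cast; ring,
              PySem.List.slice_from_natCast, List.eraseIdx_eq_take_drop_succ]
          rw [hpop, ih]
          simp only [Prod.mk.injEq]
          exact ⟨by ring, trivial⟩

-- ===== VERDICT (by name: the statement is the Claim_ definition above) =====
theorem dynamic_palindrome_removal_spec : Claim_equal_dynamic_palindrome_removal := by
  intro arr memo _
  show _ = _
  unfold dynamic_palindrome_removal dynamic_palindrome_removal_alt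
  rw [pvCount_eq]
  simp
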